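-- pv_equiv track=rewrite | github.com/pedroter7/useful_scripts | generate_latex.py | build_eye_matrix_rows_array
-- ===== SOURCE A (Python) =====
-- def build_eye_matrix_rows_array(matrix_order):
--     n = matrix_order
--     matrix_rows = []
--     for i in range(n):
--         row = []
--         for j in range(n):
--             if i == j:
--                 row.append("1")
--             else:
--                 row.append("0")
--         matrix_rows.append(row)
--     return matrix_rows
-- ===== SOURCE B (Python) =====
-- def build_eye_matrix_rows_array(matrix_order):
--     # Rotation construction: the first row is [1,0,...,0]; every later row is
--     # the previous row rotated right by one, which walks the 1 down the diagonal.
--     if matrix_order <= 0: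
--         return []
--     rows = []
--     row = ["1"] + ["0"] * (matrix_order - 1)
--     for _ in range(matrix_order):
--         rows.append(row)
--         row = row[-1:] + row[:-1]
--     return rows
-- ===== Notes on version B (the rewrite author's own statement) =====
-- stated objective: alternative
-- what changed: Instead of deciding every cell with nested i/j loops and an i==j test, B builds only the first row ["1","0",...,"0"] and generates each subsequent row by rotating the previous row right by one (row = row[-1:] + row[:-1]), so no cell-level comparison occurs at all.
import Mathlib
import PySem

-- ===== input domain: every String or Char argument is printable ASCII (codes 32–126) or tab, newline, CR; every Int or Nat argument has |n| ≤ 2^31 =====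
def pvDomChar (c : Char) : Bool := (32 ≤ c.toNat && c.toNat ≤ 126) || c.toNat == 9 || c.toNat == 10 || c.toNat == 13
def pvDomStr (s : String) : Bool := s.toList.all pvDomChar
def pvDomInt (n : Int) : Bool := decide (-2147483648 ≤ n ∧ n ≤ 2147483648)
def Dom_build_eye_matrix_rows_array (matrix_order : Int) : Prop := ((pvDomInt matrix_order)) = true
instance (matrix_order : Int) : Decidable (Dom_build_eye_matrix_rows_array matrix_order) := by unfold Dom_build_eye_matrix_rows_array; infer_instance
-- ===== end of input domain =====

-- B generates the identity rows by rotating the first row right one step per row (no cell-level i==j test); alternative algorithm, same O(n^2) cost.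


-- ===== PORT A =====
def build_eye_matrix_rows_array (matrix_order : Int) : List (List String) :=
  (PySem.List.pyRange 0 matrix_order 1).foldl
    (fun matrix_rows i =>
      matrix_rows ++
        [(PySem.List.pyRange 0 matrix_order 1).foldl
          (fun row j => row ++ [if i = j then "1" else "0"]) []])
    []

-- ===== PORT B =====
-- B: first row ["1","0",...,"0"]; each later row = previous row rotated right by one.
def build_eye_matrix_rows_array_alt (matrix_order : Int) : List (List String) :=
  if matrix_order ≤ 0 then []
  else
    let row0 : List String := ["1"] ++ List.replicate (matrix_order - 1).toNat "0"
    ((PySem.List.pyRange 0 matrix_order 1).foldl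
      (fun p _ =>
        (p.1 ++ [p.2],
         PySem.List.slice p.2 (some (-1)) none ++ PySem.List.slice p.2 none (some (-1))))
      (([] : List (List String)), row0)).1

-- ===== PRECONDITION & SPEC =====
def Spec_build_eye_matrix_rows_array (matrix_order : Int) (out : List (List String)) : Prop := out = build_eye_matrix_rows_array_alt matrix_order
instance (matrix_order : Int) (out : List (List String)) : Decidable (Spec_build_eye_matrix_rows_array matrix_order out) := by unfold Spec_build_eye_matrix_rows_array; infer_instance

-- ===== CLAIM (what is proved, stated in full; the proofs are below) =====
def Claim_equal_build_eye_matrix_rows_array : Prop := ∀ (matrix_order : Int), Dom_build_eye_matrix_rows_array matrix_order → Spec_build_eye_matrix_rows_array matrix_order (build_eye_matrix_rows_array matrix_order)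

-- ===== LEMMAS AND PROOFS =====

-- one right-rotation of a canonical row (with at least one trailing "0") shifts the "1" right
lemma rot_row (a b : Nat) :
    PySem.List.slice (List.replicate a "0" ++ "1" :: List.replicate (b+1) "0") (some (-1)) none ++
      PySem.List.slice (List.replicate a "0" ++ "1" :: List.replicate (b+1) "0") none (some (-1))
      = List.replicate (a+1) "0" ++ "1" :: List.replicate b "0" := by
  rw [PySem.List.slice_from_neg_one, PySem.List.slice_to_neg_one]
  have hsplit : List.replicate a "0" ++ "1" :: List.replicate (b+1) "0"
      = (List.replicate a "0" ++ "1" :: List.replicate b "0") ++ ["0"] := by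
    rw [List.replicate_succ' (n := b)]; simp
  rw [hsplit]
  have hlen : ((List.replicate a "0" ++ "1" :: List.replicate b "0") ++ ["0"]).length - 1
      = (List.replicate a "0" ++ "1" :: List.replicate b "0").length := by simp
  rw [hlen, List.dropLast_concat, List.drop_left]
  rw [List.replicate_succ (n := a)]
  simp

-- the rotation loop, characterised on an arbitrary driving list and start row
lemma loop_spec (l : List Int) (a b : Nat) (acc : List (List String))
    (h : l.length ≤ b + 1) :
    (l.foldl
      (fun p _ =>
        (p.1 ++ [p.2],
         PySem.List.slice p.2 (some (-1)) none ++ PySem.List.slice p.2 none (some (-1))))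
      (acc, List.replicate a "0" ++ "1" :: List.replicate b "0")).1
      = acc ++ (List.range l.length).map
          (fun k => List.replicate (a+k) "0" ++ "1" :: List.replicate (b-k) "0") := by
  induction l generalizing a b acc with
  | nil => simp
  | cons x l ih =>
    rw [List.foldl_cons]
    cases b with
    | zero =>
      have hl : l = [] := List.eq_nil_of_length_eq_zero (by simpa using h)
      subst hl
      simp
    | succ b' =>
      rw [rot_row]
      rw [ih (a+1) b' _ (by simpa using h)]
      rw [List.length_cons, List.range_succ_eq_map]
      simp only [List.map_cons, List.map_map]
      simp only [List.append_assoc, List.singleton_append]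
      congr 1
      congr 1
      apply List.map_congr_left
      intro k _
      simp only [Function.comp_apply, Nat.succ_eq_add_one]
      rw [show a + 1 + k = a + (k + 1) from by omega,
        show b' - k = b' + 1 - (k + 1) from by omega]

-- A's row i written in canonical form
lemma row_form (N i : Nat) (hi : i < N) :
    (List.range N).map (fun j => if (i : Int) = (j : Nat) then "1" else "0")
      = List.replicate i "0" ++ "1" :: List.replicate (N-1-i) "0" := by
  apply List.ext_getElem
  · simp; omega
  · intro j h1 h2
    simp only [List.getElem_map, List.getElem_range]
    simp only [List.length_map, List.length_range] at h1
    rcases lt_trichotomy j i with h|h|h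
    · simp only [List.getElem_append, List.length_replicate]
      rw [dif_pos h, List.getElem_replicate]
      have : ¬ ((i : Int) = (j : Nat)) := by exact_mod_cast Nat.ne_of_gt h
      simp [this]
    · subst h
      simp only [List.getElem_append, List.length_replicate]
      rw [dif_neg (by omega)]
      simp
    · simp only [List.getElem_append, List.length_replicate]
      rw [dif_neg (by omega)]
      simp only [List.getElem_cons]
      rw [dif_neg (by omega)]
      rw [List.getElem_replicate]
      have : ¬ ((i : Int) = (j : Nat)) := by exact_mod_cast Nat.ne_of_lt h
      simp [this]

-- ===== VERDICT (by name: the statement is the Claim_ definition above) =====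
theorem build_eye_matrix_rows_array_spec : Claim_equal_build_eye_matrix_rows_array := by
  intro n _
  unfold Spec_build_eye_matrix_rows_array
  unfold build_eye_matrix_rows_array build_eye_matrix_rows_array_alt
  by_cases hn : n ≤ 0
  · rw [if_pos hn, PySem.List.pyRange_one_eq_nil hn]
    simp
  · rw [if_neg hn]
    rw [Int.not_le] at hn
    have hN : 1 ≤ n.toNat := by omega
    -- B side
    have hrow0 : (["1"] ++ List.replicate (n - 1).toNat "0" : List String)
        = List.replicate 0 "0" ++ "1" :: List.replicate (n.toNat - 1) "0" := by
      have : (n - 1).toNat = n.toNat - 1 := by omega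
      simp [this]
    rw [hrow0,
      loop_spec (PySem.List.pyRange 0 n 1) 0 (n.toNat - 1) []
        (by rw [PySem.List.length_pyRange_one]; omega)]
    rw [PySem.List.length_pyRange_one]
    -- A side
    rw [PySem.List.foldl_append_singleton_eq_map, PySem.List.pyRange_one]
    simp only [Int.sub_zero, zero_add, List.map_map, List.nil_append]
    apply List.ext_getElem
    · simp
    · intro i h1 h2
      simp only [List.getElem_map, List.getElem_range, Function.comp_apply]
      simp only [List.length_map, List.length_range] at h1
      rw [PySem.List.foldl_append_singleton_eq_map]
      simp only [List.map_map, List.nil_append]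
      have : ((fun j : Int => if (i : Int) = j then "1" else "0") ∘ fun k : Nat => (k : Int))
          = fun j : Nat => if (i : Int) = (j : Nat) then "1" else "0" := rfl
      rw [this, row_form n.toNat i (by simpa [Int.sub_zero] using h1)]
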